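-- pv_equiv track=rewrite | github.com/jprzygodaGD/PYTHON-BASIC | practice/1_python_part_1/task4.py | calculate_power_with_difference
-- ===== SOURCE A (Python) =====
-- from typing import List
--
-- def calculate_power_with_difference(ints: List[int]) -> List[int]:
--     """Calculates power of each integer and then subtracts difference between previous value and its power"""
--
--     # Start at the second number of the list
--     i = 1
--     new_ints = [ints[0] ** 2]
--     while i < len(ints):
--
--         new_val = ints[i]**2 - (new_ints[i-1] - ints[i-1])
--         new_ints.append(new_val)
--         i += 1
--
--     return new_ints
-- ===== SOURCE B (Python) =====
-- def calculate_power_with_difference(ints):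
--     """Calculates power of each integer and then subtracts difference between previous value and its power"""
--     # Contribution array: c[0] = ints[0]**2, c[j] = ints[j]**2 + ints[j-1].
--     contribs = [ints[0] ** 2] + [cur * cur + prev for prev, cur in zip(ints, ints[1:])]
--     # d[i] = (-1)**i * sum_{j<=i} (-1)**j c[j]: one pass with a signed running sum.
--     result = []
--     acc = 0
--     sign = 1
--     for c in contribs:
--         acc += sign * c
--         result.append(sign * acc)
--         sign = -sign
--     return result
-- ===== Notes on version B (the rewrite author's own statement) =====
-- stated objective: alternative
-- what changed: Replaces A's step-by-step recurrence d[i]=ints[i]**2-(d[i-1]-ints[i-1]) over a growing output list with a build-contributions/prefix-sum decomposition: B materialises the contribution array c (c[0]=ints[0]**2, c[j]=ints[j]**2+ints[j-1] via zip) and then emits d[i]=(-1)**i * running alternating sum of c in one pass over c, never reading back the output list.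
import Mathlib
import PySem

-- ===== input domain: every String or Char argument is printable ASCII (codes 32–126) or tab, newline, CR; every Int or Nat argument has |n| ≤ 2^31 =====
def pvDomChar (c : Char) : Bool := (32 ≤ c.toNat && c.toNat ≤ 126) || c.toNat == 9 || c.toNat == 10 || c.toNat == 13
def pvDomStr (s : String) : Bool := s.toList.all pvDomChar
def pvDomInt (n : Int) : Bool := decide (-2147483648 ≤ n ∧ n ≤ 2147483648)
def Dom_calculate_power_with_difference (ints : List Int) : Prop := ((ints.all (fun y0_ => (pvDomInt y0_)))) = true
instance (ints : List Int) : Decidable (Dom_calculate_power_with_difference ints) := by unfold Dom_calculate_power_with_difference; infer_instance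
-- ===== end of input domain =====

-- B replaces A's read-back recurrence with a contribution array + signed prefix sum ("alternative" decomposition).

-- ===== PORT A =====
-- while i < len(ints): new_ints.append(ints[i]**2 - (new_ints[i-1] - ints[i-1])); i += 1
-- All three indexings are in range whenever ints ≠ [] (Pre_), so getD with default 0 is exact there.
def pvGoA (ints : List Int) (i : Nat) (new_ints : List Int) : List Int :=
  if i < ints.length then
    pvGoA ints (i + 1)
      (new_ints ++ [(ints.getD i 0) ^ 2 - (new_ints.getD (i - 1) 0 - ints.getD (i - 1) 0)])
  else new_ints
termination_by ints.length - i

def calculate_power_with_difference (ints : List Int) : List Int :=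
  match ints with
  | [] => []                       -- Python raises IndexError here (excluded by Pre_)
  | x :: _ => pvGoA ints 1 [x ^ 2]

-- ===== PORT B =====
def pvStepB (st : List Int × Int × Int) (c : Int) : List Int × Int × Int :=
  let acc := st.2.1 + st.2.2 * c
  (st.1 ++ [st.2.2 * acc], acc, -st.2.2)

def calculate_power_with_difference_alt (ints : List Int) : List Int :=
  match ints with
  | [] => []                       -- Python raises IndexError on ints[0] here (excluded by Pre_)
  | x :: _ =>
    let contribs := x ^ 2 ::
      (ints.zip (PySem.List.slice ints (some 1) none)).map (fun p => p.2 * p.2 + p.1)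
    (contribs.foldl pvStepB ([], 0, 1)).1

-- ===== PRECONDITION & SPEC =====
-- Pre_ excludes exactly the empty list, on which Python A raises IndexError (ints[0]).
def Pre_calculate_power_with_difference (ints : List Int) : Prop := ints ≠ []
instance (ints : List Int) : Decidable (Pre_calculate_power_with_difference ints) := by unfold Pre_calculate_power_with_difference; infer_instance
def pvWitness_calculate_power_with_difference : List Int := [1, 2, 3]

def Spec_calculate_power_with_difference (ints : List Int) (out : List Int) : Prop := out = calculate_power_with_difference_alt ints
instance (ints : List Int) (out : List Int) : Decidable (Spec_calculate_power_with_difference ints out) := by unfold Spec_calculate_power_with_difference; infer_instance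

-- ===== CLAIM (what is proved, stated in full; the proofs are below) =====
def Claim_equal_calculate_power_with_difference : Prop := ∀ (ints : List Int), Dom_calculate_power_with_difference ints → Pre_calculate_power_with_difference ints → Spec_calculate_power_with_difference ints (calculate_power_with_difference ints)

-- ===== LEMMAS AND PROOFS =====

-- Reference recursion on contribution values: refC d (c :: t) emits c - d and recurses.
def refC (d : Int) : List Int → List Int
  | [] => []
  | c :: t => (c - d) :: refC (c - d) t

-- Reference recursion on (prev, cur) pairs, mirroring A's step.
def refP (d : Int) : List (Int × Int) → List Int
  | [] => []
  | p :: t => (p.2 ^ 2 - (d - p.1)) :: refP (p.2 ^ 2 - (d - p.1)) t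

lemma refP_eq_refC (ps : List (Int × Int)) (d : Int) :
    refP d ps = refC d (ps.map (fun p => p.2 * p.2 + p.1)) := by
  induction ps generalizing d with
  | nil => rfl
  | cons p t ih =>
      simp only [refP, refC, List.map]
      have h1 : p.2 ^ 2 - (d - p.1) = p.2 * p.2 + p.1 - d := by ring
      rw [h1, ih]

lemma foldB_eq_refC (cs : List Int) (out : List Int) (acc sign : Int) (h : sign * sign = 1) :
    (cs.foldl pvStepB (out, acc, sign)).1 = out ++ refC (-(sign * acc)) cs := by
  induction cs generalizing out acc sign with
  | nil => simp [refC]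
  | cons c t ih =>
      simp only [List.foldl, pvStepB]
      rw [ih _ _ _ (by rw [neg_mul_neg]; exact h)]
      have h1 : sign * (acc + sign * c) = c - -(sign * acc) := by
        have : sign * (sign * c) = c := by rw [← mul_assoc, h, one_mul]
        rw [mul_add, this]; ring
      have h2 : -(-sign * (acc + sign * c)) = c - -(sign * acc) := by
        have : sign * (sign * c) = c := by rw [← mul_assoc, h, one_mul]
        rw [neg_mul, neg_neg, mul_add, this]; ring
      rw [h1, h2]
      simp [refC]

lemma goA_eq_refP (ints : List Int) : ∀ (k i : Nat) (acc : List Int) (d : Int),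
    ints.length - i = k → 0 < i → acc.length = i → acc.getD (i - 1) 0 = d →
    pvGoA ints i acc = acc ++ refP d ((ints.drop (i - 1)).zip (ints.drop i)) := by
  intro k
  induction k with
  | zero =>
      intro i acc d hk _ _ _
      have hge : ints.length ≤ i := by omega
      rw [pvGoA]
      simp [Nat.not_lt.mpr hge, List.drop_eq_nil_of_le hge, refP]
  | succ k ih =>
      intro i acc d hk hi hlen hd
      have hlt : i < ints.length := by omega
      have hlt' : i - 1 < ints.length := by omega
      rw [pvGoA]
      simp only [hlt, if_true]
      set v : Int := (ints.getD i 0) ^ 2 - (acc.getD (i - 1) 0 - ints.getD (i - 1) 0) with hv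
      rw [ih (i + 1) (acc ++ [v]) v (by omega) (by omega)
            (by simp [hlen])
            (by simp only [Nat.add_sub_cancel, ← hlen]
                simp [List.getD_eq_getElem?_getD])]
      have him : i - 1 + 1 = i := by omega
      have hdrop1 : ints.drop (i - 1) = ints[i - 1] :: ints.drop i := by
        rw [List.drop_eq_getElem_cons hlt', him]
      have hdrop2 : ints.drop i = ints[i] :: ints.drop (i + 1) := List.drop_eq_getElem_cons hlt
      have hstep : refP d ((ints.drop (i - 1)).zip (ints.drop i))
          = v :: refP v (((ints.drop ((i + 1) - 1)).zip (ints.drop (i + 1)))) := by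
        rw [hdrop1]
        conv_lhs => rw [hdrop2]
        simp only [List.zip_cons_cons, refP, Nat.add_sub_cancel]
        rw [← hdrop2]
        have hgi : ints.getD i 0 = ints[i] := List.getD_eq_getElem ints 0 hlt
        have hgi1 : ints.getD (i - 1) 0 = ints[i - 1] := List.getD_eq_getElem ints 0 hlt'
        have hveq : v = ints[i] ^ 2 - (d - ints[i - 1]) := by rw [hv, hgi, hgi1, hd]
        rw [hveq]
      rw [hstep]
      simp

-- ===== VERDICT (by name: the statement is the Claim_ definition above) =====
theorem calculate_power_with_difference_spec : Claim_equal_calculate_power_with_difference := by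
  intro ints _ hpre
  unfold Spec_calculate_power_with_difference
  match ints, hpre with
  | x :: rest, _ =>
    show pvGoA (x :: rest) 1 [x ^ 2] = _
    rw [goA_eq_refP (x :: rest) rest.length 1 [x ^ 2] (x ^ 2) (by simp) (by omega) rfl rfl]
    unfold calculate_power_with_difference_alt
    simp only [PySem.List.slice_from_one]
    rw [foldB_eq_refC _ _ _ _ (by norm_num)]
    simp only [List.nil_append, List.drop_one, List.tail_cons, refC,
      mul_zero, neg_zero, sub_zero, refP_eq_refC]
    norm_num
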